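-- pv_equiv track=rewrite | github.com/dmiyakawa/atcoder-workspace | nomura2020/C/main.py | solve
-- ===== SOURCE A (Python) =====
-- def solve(N, A):
--     total_nodes = 0
--     num_current_nodes = 1
--     num_remaining_leafs = sum(A)
--     for i, a in enumerate(A):
--         if a > num_current_nodes or num_current_nodes > num_remaining_leafs:
--             return -1
--         total_nodes += num_current_nodes
--         num_current_nodes -= a
--         num_remaining_leafs -= a
--         num_current_nodes = min(num_current_nodes * 2, num_remaining_leafs)
--     return total_nodes
-- ===== SOURCE B (Python) =====
-- def suffix_sums(A):
--     # sufs[i] = sum(A[i:]); built in one forward pass from the total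
--     s = sum(A)
--     sufs = []
--     for a in A:
--         sufs.append(s)
--         s -= a
--     sufs.append(s)
--     return sufs
--
--
-- def level_caps(A, sufs):
--     # caps[i] = number of nodes available at depth i (root capacity 1),
--     # next capacity = min(2 * (free nodes), leaves still to place)
--     caps = []
--     c = 1
--     for a, s in zip(A, sufs[1:]):
--         caps.append(c)
--         # a negative capacity only arises after an impossible level (the check
--         # pass will report -1 anyway); floor it at 0 to keep the numbers small
--         c = max(min(2 * (c - a), s), 0)
--     return caps
--
--
-- def solve(N, A):
--     sufs = suffix_sums(A)
--     caps = level_caps(A, sufs)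
--     if any(a > c or c > s for a, c, s in zip(A, caps, sufs)):
--         return -1
--     return sum(caps)
-- ===== Notes on version B (the rewrite author's own statement) =====
-- stated objective: alternative
-- what changed: Replaces A's single running greedy scan with early return and three mutating accumulators by three explicit passes: build a suffix-sum array, build a per-depth capacity array, then a separate validity check and a sum.
import Mathlib
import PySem

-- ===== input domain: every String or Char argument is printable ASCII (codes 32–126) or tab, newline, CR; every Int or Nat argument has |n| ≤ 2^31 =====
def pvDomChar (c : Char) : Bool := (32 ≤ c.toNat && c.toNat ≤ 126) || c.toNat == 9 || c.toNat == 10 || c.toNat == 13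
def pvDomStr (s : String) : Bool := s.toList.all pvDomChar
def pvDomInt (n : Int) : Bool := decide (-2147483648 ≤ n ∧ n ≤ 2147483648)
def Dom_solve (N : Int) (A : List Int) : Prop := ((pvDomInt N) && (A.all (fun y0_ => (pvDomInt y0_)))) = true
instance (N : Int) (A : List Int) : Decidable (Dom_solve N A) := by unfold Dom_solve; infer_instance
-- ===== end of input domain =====

-- B replaces A's single running greedy scan (with early return) by three explicit
-- passes: a suffix-sum array, a level-capacity array, then a failure check and a sum
-- (objective: alternative decomposition, same O(n) cost).

-- ===== PORT A =====
-- the loop of A: state (total_nodes, num_current_nodes, num_remaining_leafs)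
def solveGo : List Int → Int → Int → Int → Int
  | [], total, _, _ => total
  | a :: rest, total, cur, rem =>
    if a > cur || cur > rem then -1
    else solveGo rest (total + cur) (min ((cur - a) * 2) (rem - a)) (rem - a)

def solve (N : Int) (A : List Int) : Int := solveGo A 0 1 A.sum

-- ===== PORT B =====
-- suffix_sums: forward pass emitting the running remainder s, starting at sum(A)
def sufGo : List Int → Int → List Int
  | [], s => [s]
  | a :: rest, s => s :: sufGo rest (s - a)

def suffixSums (A : List Int) : List Int := sufGo A A.sum

-- level_caps: walk A zipped with sufs[1:], emitting capacity c per level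
-- (floored at 0: a negative capacity only follows an impossible level)
def capsGo : List Int → List Int → Int → List Int
  | a :: ar, s :: sr, c => c :: capsGo ar sr (max (min (2 * (c - a)) s) 0)
  | _, _, _ => []

def levelCaps (A sufs : List Int) : List Int := capsGo A sufs.tail 1

-- any(a > c or c > s for a, c, s in zip(A, caps, sufs))
def anyBad : List Int → List Int → List Int → Bool
  | a :: ar, c :: cr, s :: sr => (a > c || c > s) || anyBad ar cr sr
  | _, _, _ => false

def solve_alt (N : Int) (A : List Int) : Int :=
  let sufs := suffixSums A
  let caps := levelCaps A sufs
  if anyBad A caps sufs then -1 else caps.sum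

-- ===== PRECONDITION & SPEC =====
def Spec_solve (N : Int) (A : List Int) (out : Int) : Prop := out = solve_alt N A
instance (N : Int) (A : List Int) (out : Int) : Decidable (Spec_solve N A out) := by unfold Spec_solve; infer_instance

-- ===== CLAIM (what is proved, stated in full; the proofs are below) =====
def Claim_equal_solve : Prop := ∀ (N : Int) (A : List Int), Dom_solve N A → Spec_solve N A (solve N A)

-- ===== LEMMAS AND PROOFS =====

theorem sufGo_head (A : List Int) (s : Int) : ∃ t, sufGo A s = s :: t := by
  cases A <;> exact ⟨_, rfl⟩

theorem solveGo_eq (A : List Int) : ∀ (c total : Int),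
    solveGo A total c A.sum =
      (if anyBad A (capsGo A (sufGo A A.sum).tail c) (sufGo A A.sum) then -1
       else total + (capsGo A (sufGo A A.sum).tail c).sum) := by
  induction A with
  | nil => intro c total; simp [solveGo, capsGo, anyBad]
  | cons a r ih =>
    intro c total
    obtain ⟨t, ht⟩ := sufGo_head r r.sum
    have hsum : (a :: r).sum = a + r.sum := by simp
    have hsub : a + r.sum - a = r.sum := by ring
    rw [hsum]
    show (if a > c || c > a + r.sum then -1
          else solveGo r (total + c) (min ((c - a) * 2) (a + r.sum - a)) (a + r.sum - a)) = _
    rw [hsub]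
    have hcap : (c - a) * 2 = 2 * (c - a) := by ring
    rw [hcap]
    have hsuf : sufGo (a :: r) (a + r.sum) = (a + r.sum) :: sufGo r r.sum := by
      simp [sufGo, hsub]
    rw [hsuf, ht]
    show (if a > c || c > a + r.sum then -1 else solveGo r (total + c) (min (2 * (c - a)) r.sum) r.sum) =
      (if ((a > c || c > a + r.sum) || anyBad r (capsGo r t (max (min (2 * (c - a)) r.sum) 0)) (r.sum :: t)) then -1
       else total + (c + (capsGo r t (max (min (2 * (c - a)) r.sum) 0)).sum))
    by_cases hb : (a > c || c > a + r.sum) = true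
    · simp [hb]
    · have hb' : a ≤ c ∧ c ≤ a + r.sum := by
        simp only [Bool.or_eq_true, decide_eq_true_eq, not_or, not_lt] at hb
        exact ⟨hb.1, hb.2⟩
      have hmax : max (min (2 * (c - a)) r.sum) 0 = min (2 * (c - a)) r.sum := by omega
      rw [hmax]
      have := ih (min (2 * (c - a)) r.sum) (total + c)
      rw [ht] at this
      simp only [List.tail_cons] at this
      simp only [hb, Bool.false_or, this]
      by_cases hb2 : anyBad r (capsGo r t (min (2 * (c - a)) r.sum)) (r.sum :: t) = true
      · simp [hb2]
      · rw [if_neg hb2, if_neg hb2]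
        simp [add_assoc]

-- ===== VERDICT (by name: the statement is the Claim_ definition above) =====
theorem solve_spec : Claim_equal_solve := by
  intro N A _
  unfold Spec_solve solve solve_alt suffixSums levelCaps
  obtain ⟨t, ht⟩ := sufGo_head A A.sum
  rw [solveGo_eq A 1 0]
  simp
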